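-- pv_equiv track=rewrite | github.com/danielhuf/INF1025 | Exercicio_7.py | contOrdem
-- ===== SOURCE A (Python) =====
-- def contOrdem(n1,n2):
--     if n1<10 and n2<10:
--         if n2<=n1:
--             return False      #é bom sempre começar com as sentenças falsas,
--         else:                 #porque quando chega no True meio que "para"
--             return True
--     else:
--         if n2%10<=n1%10:
--             return False
--         else:
--             return contOrdem(n1//10,n2//10)
-- ===== SOURCE B (Python) =====
-- def contOrdem(n1, n2):
--     # strip both numbers down to their leading parts, counting the digits removed
--     a, b, k = n1, n2, 0
--     while a >= 10 or b >= 10: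
--         a //= 10
--         b //= 10
--         k += 1
--     # heads must be strictly increasing, and so must every stripped digit pair
--     return b > a and all((n2 // 10**i) % 10 > (n1 // 10**i) % 10 for i in range(k))
-- ===== Notes on version B (the rewrite author's own statement) =====
-- stated objective: alternative
-- what changed: Replaced A's single recursion that interleaves the per-digit test with the stripping by a two-phase program: one loop that only strips both numbers to their leading parts while counting the steps k, then a head comparison and an all() over the k digit positions extracted arithmetically with powers of 10.
import Mathlib
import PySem

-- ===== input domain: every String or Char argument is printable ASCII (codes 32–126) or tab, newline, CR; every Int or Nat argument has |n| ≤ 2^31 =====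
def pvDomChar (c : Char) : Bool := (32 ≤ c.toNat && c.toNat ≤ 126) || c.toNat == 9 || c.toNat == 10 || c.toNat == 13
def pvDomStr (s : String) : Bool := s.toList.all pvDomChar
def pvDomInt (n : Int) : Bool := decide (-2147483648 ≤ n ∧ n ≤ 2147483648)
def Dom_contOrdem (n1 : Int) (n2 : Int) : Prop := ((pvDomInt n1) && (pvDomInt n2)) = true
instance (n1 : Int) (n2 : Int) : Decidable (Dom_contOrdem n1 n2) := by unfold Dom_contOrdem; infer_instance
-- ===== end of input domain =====

-- B separates A's interleaved recursion into two phases: one loop that only strips both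
-- numbers to their leading parts (counting steps k), then a single all() over the k digit
-- positions via powers of 10; objective: alternative (different decomposition, same cost).

-- termination helpers for the ports (cited by decreasing_by)
theorem pvFd10_toNat_le (n : Int) : (PySem.Int.floordiv n 10).toNat ≤ n.toNat := by
  rw [PySem.Int.floordiv_eq_ediv_of_pos (by norm_num)]; omega

theorem pvFd10_toNat_lt (n : Int) (h : 10 ≤ n) : (PySem.Int.floordiv n 10).toNat < n.toNat := by
  rw [PySem.Int.floordiv_eq_ediv_of_pos (by norm_num)]; omega

-- ===== PORT A =====
def contOrdem (n1 : Int) (n2 : Int) : Bool :=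
  if n1 < 10 ∧ n2 < 10 then
    if n2 ≤ n1 then false
    else true
  else
    if PySem.Int.mod n2 10 ≤ PySem.Int.mod n1 10 then false
    else contOrdem (PySem.Int.floordiv n1 10) (PySem.Int.floordiv n2 10)
termination_by n1.toNat + n2.toNat
decreasing_by
  rcases (by omega : 10 ≤ n1 ∨ 10 ≤ n2) with h1 | h2
  · have := pvFd10_toNat_lt n1 h1
    have := pvFd10_toNat_le n2
    omega
  · have := pvFd10_toNat_lt n2 h2
    have := pvFd10_toNat_le n1
    omega

-- ===== PORT B =====
-- the while loop: strip both numbers to their heads, counting the steps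
def pvStrip (a : Int) (b : Int) (k : Int) : Int × Int × Int :=
  if 10 ≤ a ∨ 10 ≤ b then
    pvStrip (PySem.Int.floordiv a 10) (PySem.Int.floordiv b 10) (k + 1)
  else (a, b, k)
termination_by a.toNat + b.toNat
decreasing_by
  rename_i h
  rcases h with h1 | h2
  · have := pvFd10_toNat_lt a h1
    have := pvFd10_toNat_le b
    omega
  · have := pvFd10_toNat_lt b h2
    have := pvFd10_toNat_le a
    omega

def contOrdem_alt (n1 : Int) (n2 : Int) : Bool :=
  let s := pvStrip n1 n2 0
  decide (s.1 < s.2.1) &&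
    (PySem.List.pyRange 0 s.2.2 1).all (fun i =>
      decide (PySem.Int.mod (PySem.Int.floordiv n1 ((10 : Int) ^ i.toNat)) 10
            < PySem.Int.mod (PySem.Int.floordiv n2 ((10 : Int) ^ i.toNat)) 10))

-- ===== PRECONDITION & SPEC =====
def Spec_contOrdem (n1 : Int) (n2 : Int) (out : Bool) : Prop := out = contOrdem_alt n1 n2
instance (n1 : Int) (n2 : Int) (out : Bool) : Decidable (Spec_contOrdem n1 n2 out) := by unfold Spec_contOrdem; infer_instance

-- ===== CLAIM (what is proved, stated in full; the proofs are below) =====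
def Claim_equal_contOrdem : Prop := ∀ (n1 : Int) (n2 : Int), Dom_contOrdem n1 n2 → Spec_contOrdem n1 n2 (contOrdem n1 n2)

-- ===== LEMMAS AND PROOFS =====

theorem pvStrip_base {a b : Int} (k : Int) (h : ¬ (10 ≤ a ∨ 10 ≤ b)) :
    pvStrip a b k = (a, b, k) := by
  rw [pvStrip]; simp [h]

theorem pvStrip_step {a b : Int} (k : Int) (h : 10 ≤ a ∨ 10 ≤ b) :
    pvStrip a b k = pvStrip (PySem.Int.floordiv a 10) (PySem.Int.floordiv b 10) (k + 1) := by
  rw [pvStrip]; simp [h]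

-- the counter only shifts the third component
theorem pvStrip_shift (a b : Int) (k : Int) :
    pvStrip a b (k + 1) =
      ((pvStrip a b k).1, (pvStrip a b k).2.1, (pvStrip a b k).2.2 + 1) := by
  fun_induction pvStrip a b k with
  | case1 a b k h ih =>
    rw [pvStrip_step (k + 1) h, ih]
  | case2 a b k h =>
    rw [pvStrip_base (k + 1) h]

theorem pvStrip_k_ge (a b : Int) (k : Int) : k ≤ (pvStrip a b k).2.2 := by
  fun_induction pvStrip a b k with
  | case1 a b k h ih => exact le_trans (by omega) ih
  | case2 a b k h => simp

-- floor division by one is the identity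
theorem pvFdOne (n : Int) : PySem.Int.floordiv n 1 = n := by
  rw [PySem.Int.floordiv_eq_ediv_of_pos (by norm_num)]; omega

-- dividing by 10^(m+1) is dividing by 10 then by 10^m
theorem pvFd_pow_succ (n : Int) (m : Nat) :
    PySem.Int.floordiv n ((10 : Int) ^ (m + 1)) =
      PySem.Int.floordiv (PySem.Int.floordiv n 10) ((10 : Int) ^ m) := by
  rw [PySem.Int.floordiv_eq_ediv_of_pos (by positivity),
      PySem.Int.floordiv_eq_ediv_of_pos (by norm_num),
      PySem.Int.floordiv_eq_ediv_of_pos (by positivity),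
      Int.ediv_ediv_of_nonneg (by norm_num : (0:Int) ≤ 10)]
  ring_nf

theorem pvAll_congr (xs : List Int) (p q : Int → Bool) (h : ∀ x ∈ xs, p x = q x) :
    xs.all p = xs.all q := by
  induction xs with
  | nil => rfl
  | cons x xs ih => simp_all [List.all_cons]

-- shifting a unit range by one
theorem pvRange_shift (K : Int) (hK : 0 ≤ K) :
    PySem.List.pyRange 1 (K + 1) 1 = (PySem.List.pyRange 0 K 1).map (· + 1) := by
  rw [PySem.List.pyRange_one, PySem.List.pyRange_one, List.map_map]
  have : (K + 1 - 1).toNat = (K - 0).toNat := by omega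
  rw [this]
  apply List.map_congr_left
  intro k _
  simp; omega

theorem contOrdem_eq_alt (n1 n2 : Int) : contOrdem n1 n2 = contOrdem_alt n1 n2 := by
  fun_induction contOrdem n1 n2 with
  | case1 n1 n2 hbase hle =>
    -- both heads, n2 ≤ n1 : A returns false
    unfold contOrdem_alt
    rw [pvStrip_base 0 (by omega)]
    simp
    omega
  | case2 n1 n2 hbase hle =>
    -- both heads, n1 < n2 : A returns true
    unfold contOrdem_alt
    rw [pvStrip_base 0 (by omega)]
    simp [PySem.List.pyRange_one_eq_nil (by omega : (0:Int) ≤ 0)]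
    omega
  | case3 n1 n2 hbase hdig =>
    -- last digits not increasing : A returns false, and B's all() fails at i = 0
    unfold contOrdem_alt
    have hc : 10 ≤ n1 ∨ 10 ≤ n2 := by omega
    have hk : 1 ≤ (pvStrip n1 n2 0).2.2 := by
      rw [pvStrip_step 0 hc]
      exact pvStrip_k_ge _ _ 1
    have h0 : (0 : Int) ∈ PySem.List.pyRange 0 (pvStrip n1 n2 0).2.2 1 := by
      rw [PySem.List.mem_pyRange_one]; omega
    have hall : (PySem.List.pyRange 0 (pvStrip n1 n2 0).2.2 1).all (fun i =>
        decide (PySem.Int.mod (PySem.Int.floordiv n1 ((10 : Int) ^ i.toNat)) 10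
              < PySem.Int.mod (PySem.Int.floordiv n2 ((10 : Int) ^ i.toNat)) 10)) = false := by
      rw [List.all_eq_false]
      refine ⟨0, h0, ?_⟩
      simp only [Int.toNat_zero, pow_zero, pvFdOne, decide_eq_true_eq, not_lt]
      exact hdig
    simp only [hall, Bool.and_false]
  | case4 n1 n2 hbase hdig ih =>
    -- strictly increasing last digits : peel one layer off B
    rw [ih]
    unfold contOrdem_alt
    have hc : 10 ≤ n1 ∨ 10 ≤ n2 := by omega
    have hK : (0 : Int) ≤ (pvStrip (PySem.Int.floordiv n1 10) (PySem.Int.floordiv n2 10) 0).2.2 :=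
      pvStrip_k_ge _ _ 0
    rcases hP : pvStrip (PySem.Int.floordiv n1 10) (PySem.Int.floordiv n2 10) 0 with ⟨A, B, K⟩
    rw [hP] at hK
    have hK' : (0 : Int) ≤ K := by simpa using hK
    simp only [pvStrip_step 0 hc, pvStrip_shift _ _ 0, hP]
    have h0 : (decide (PySem.Int.mod (PySem.Int.floordiv n1 ((10 : Int) ^ (0 : Int).toNat)) 10
              < PySem.Int.mod (PySem.Int.floordiv n2 ((10 : Int) ^ (0 : Int).toNat)) 10)) = true := by
      simp only [Int.toNat_zero, pow_zero, pvFdOne, decide_eq_true_eq]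
      omega
    rw [PySem.List.pyRange_one_cons (by omega : (0 : Int) < K + 1)]
    simp only [zero_add]
    rw [pvRange_shift K hK', List.all_cons, List.all_map, h0, Bool.true_and]
    congr 1
    apply pvAll_congr
    intro i hi
    have hi0 : 0 ≤ i := ((PySem.List.mem_pyRange_one).1 hi).1
    have ht : (i + 1).toNat = i.toNat + 1 := by omega
    simp only [Function.comp]
    rw [ht, pvFd_pow_succ n1 i.toNat, pvFd_pow_succ n2 i.toNat]

-- ===== VERDICT (by name: the statement is the Claim_ definition above) =====
theorem contOrdem_spec : Claim_equal_contOrdem := by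
  intro n1 n2 _
  unfold Spec_contOrdem
  exact contOrdem_eq_alt n1 n2
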